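-- pv_equiv track=rewrite | github.com/Clear-Match-Talent/candidate-triage-system | webapp/main.py | fallback_mapping
-- ===== SOURCE A (Python) =====
-- from typing import Any, Dict, List, Optional, Set, Tuple
--
-- def fallback_mapping(headers: List[str]) -> Dict[str, str]:
--     """Simple pattern matching when AI fails."""
--     result = {}
--     patterns = {
--         "linkedin_url": ["linkedin", "profile url", "linkedin url", "linkedinurl"],
--         "full_name": ["name", "full name", "fullname", "candidate name", "candidate.name"],
--         "first_name": ["first", "firstname", "first name", "candidate.firstname"],
--         "last_name": ["last", "lastname", "last name", "candidate.lastname"],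
--         "location": ["location", "city", "area", "geography", "candidate.location"],
--         "current_company": ["company", "employer", "current company", "organization", "candidate.experiences.0.company"],
--         "current_title": ["title", "job title", "position", "role", "candidate.experiences.0.title"],
--     }
--
--     for header in headers:
--         header_lower = header.lower().strip()
--         matched = False
--         for target, keywords in patterns.items():
--             if any(kw in header_lower for kw in keywords):
--                 result[header] = target
--                 matched = True
--                 break
--         if not matched:
--             result[header] = "skip"
--
--     return result
-- ===== SOURCE B (Python) =====
-- def fallback_mapping(headers):
--     """Simple pattern matching when AI fails."""
--     patterns = {
--         "linkedin_url": ["linkedin", "profile url", "linkedin url", "linkedinurl"],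
--         "full_name": ["name", "full name", "fullname", "candidate name", "candidate.name"],
--         "first_name": ["first", "firstname", "first name", "candidate.firstname"],
--         "last_name": ["last", "lastname", "last name", "candidate.lastname"],
--         "location": ["location", "city", "area", "geography", "candidate.location"],
--         "current_company": ["company", "employer", "current company", "organization", "candidate.experiences.0.company"],
--         "current_title": ["title", "job title", "position", "role", "candidate.experiences.0.title"],
--     }
--     # Transposed pass shape: outer loop over targets (in priority order), inner
--     # loop over headers; a header already assigned is never reassigned, which
--     # preserves first-target-wins priority.
--     assigned = {}
--     for target, keywords in patterns.items():
--         for header in headers: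
--             if header not in assigned:
--                 header_lower = header.lower().strip()
--                 if any(kw in header_lower for kw in keywords):
--                     assigned[header] = target
--     result = {}
--     for header in headers:
--         result[header] = assigned.get(header, "skip")
--     return result
-- ===== Notes on version B (the rewrite author's own statement) =====
-- stated objective: alternative
-- what changed: Transposed the two loops: the outer loop now runs over the pattern targets in priority order and the inner loop over headers, maintaining a dict of already-assigned headers instead of a per-header break loop; a final pass over headers emits the result in the original insertion order with 'skip' for unassigned headers.
import Mathlib
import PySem

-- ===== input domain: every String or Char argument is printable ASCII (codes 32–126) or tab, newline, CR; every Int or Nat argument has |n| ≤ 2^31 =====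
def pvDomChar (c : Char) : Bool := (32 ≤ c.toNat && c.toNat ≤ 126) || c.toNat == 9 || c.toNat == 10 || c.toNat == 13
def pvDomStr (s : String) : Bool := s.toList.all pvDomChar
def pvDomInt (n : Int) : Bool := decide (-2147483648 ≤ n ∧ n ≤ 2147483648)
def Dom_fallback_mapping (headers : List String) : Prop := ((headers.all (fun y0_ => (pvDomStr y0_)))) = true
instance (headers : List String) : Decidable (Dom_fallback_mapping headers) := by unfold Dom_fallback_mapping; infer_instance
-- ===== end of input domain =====

-- B transposes A's loops (targets outer, headers inner, with an assigned-dict and a final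
-- emission pass over headers); same return value, objective: alternative pass shape.

-- the shared patterns table (pure data, identical in Source A and Source B)
def fbPatterns : List (String × List String) :=
  [("linkedin_url", ["linkedin", "profile url", "linkedin url", "linkedinurl"]),
   ("full_name", ["name", "full name", "fullname", "candidate name", "candidate.name"]),
   ("first_name", ["first", "firstname", "first name", "candidate.firstname"]),
   ("last_name", ["last", "lastname", "last name", "candidate.lastname"]),
   ("location", ["location", "city", "area", "geography", "candidate.location"]),
   ("current_company", ["company", "employer", "current company", "organization", "candidate.experiences.0.company"]),
   ("current_title", ["title", "job title", "position", "role", "candidate.experiences.0.title"])]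

-- ===== PORT A =====
-- A's inner 'for target, keywords in patterns.items(): … break' loop
def fbMatchLoop (header_lower : String) : List (String × List String) → Option String
  | [] => none
  | (target, keywords) :: rest =>
      if keywords.any (fun kw => PySem.Str.isIn kw header_lower) then some target
      else fbMatchLoop header_lower rest

def fallback_mapping (headers : List String) : List (String × String) :=
  (headers.foldl (fun (result : PySem.Dict String String) header =>
      let header_lower := PySem.Str.strip (PySem.Str.lower header)
      match fbMatchLoop header_lower fbPatterns with
      | some target => result.insert header target
      | none => result.insert header "skip")
    PySem.Dict.empty).items

-- ===== PORT B =====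
def fallback_mapping_alt (headers : List String) : List (String × String) :=
  let assigned := fbPatterns.foldl (fun (assigned : PySem.Dict String String) p =>
      headers.foldl (fun (assigned : PySem.Dict String String) header =>
        if assigned.contains header then assigned
        else
          let header_lower := PySem.Str.strip (PySem.Str.lower header)
          if p.2.any (fun kw => PySem.Str.isIn kw header_lower) then
            assigned.insert header p.1
          else assigned) assigned)
    PySem.Dict.empty
  (headers.foldl (fun (result : PySem.Dict String String) header =>
      result.insert header (assigned.getD header "skip"))
    PySem.Dict.empty).items

-- ===== PRECONDITION & SPEC =====
def Spec_fallback_mapping (headers : List String) (out : List (String × String)) : Prop := out = fallback_mapping_alt headers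
instance (headers : List String) (out : List (String × String)) : Decidable (Spec_fallback_mapping headers out) := by unfold Spec_fallback_mapping; infer_instance

-- ===== CLAIM (what is proved, stated in full; the proofs are below) =====
def Claim_equal_fallback_mapping : Prop := ∀ (headers : List String), Dom_fallback_mapping headers → Spec_fallback_mapping headers (fallback_mapping headers)

-- ===== LEMMAS AND PROOFS =====

-- definitional reductions of Option.orElse, kept as rw/simp lemmas
theorem orElse_none_eq {α : Type} (f : Unit → Option α) : Option.orElse none f = f () := rfl
theorem orElse_some_eq {α : Type} (a : α) (f : Unit → Option α) : Option.orElse (some a) f = some a := rfl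

-- B's inner loop for one pattern does not change get? h when h is not among the headers folded
theorem fb_inner_get?_skip (h t : String) (kws : List String) :
    ∀ (hs : List String) (a : PySem.Dict String String), h ∉ hs →
      (hs.foldl (fun (assigned : PySem.Dict String String) header =>
        if assigned.contains header then assigned
        else
          let header_lower := PySem.Str.strip (PySem.Str.lower header)
          if kws.any (fun kw => PySem.Str.isIn kw header_lower) then
            assigned.insert header t
          else assigned) a).get? h = a.get? h := by
  intro hs
  induction hs with
  | nil => intro a _; rfl
  | cons x rest ih =>
    intro a hmem
    have hne : h ≠ x := fun e => hmem (e ▸ List.mem_cons_self ..)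
    have hrest : h ∉ rest := fun e => hmem (List.mem_cons_of_mem _ e)
    simp only [List.foldl_cons]
    rw [ih _ hrest]
    split_ifs <;> simp [PySem.Dict.get?_insert_of_ne _ _ hne]

-- B's inner loop over headers, for one pattern (t, kws): its effect on get? h for h ∈ hs
theorem fb_inner_get? (h t : String) (kws : List String) :
    ∀ (hs : List String) (a : PySem.Dict String String), h ∈ hs →
      (hs.foldl (fun (assigned : PySem.Dict String String) header =>
        if assigned.contains header then assigned
        else
          let header_lower := PySem.Str.strip (PySem.Str.lower header)
          if kws.any (fun kw => PySem.Str.isIn kw header_lower) then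
            assigned.insert header t
          else assigned) a).get? h
      = ((a.get? h).orElse (fun _ =>
          if kws.any (fun kw => PySem.Str.isIn kw (PySem.Str.strip (PySem.Str.lower h)))
          then some t else none)) := by
  intro hs
  induction hs with
  | nil => intro a hmem; cases hmem
  | cons x rest ih =>
    intro a hmem
    by_cases hx : h ∈ rest
    · simp only [List.foldl_cons]
      rw [ih _ hx]
      by_cases hxh : x = h
      · subst hxh
        rcases hv : a.get? x with _ | v
        · have hc : a.contains x = false := by
            rw [PySem.Dict.contains_eq_isSome_get?, hv]; rfl
          simp only [hc, Bool.false_eq_true, if_false]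
          by_cases hm : (kws.any fun kw => PySem.Str.isIn kw (PySem.Str.strip (PySem.Str.lower x))) = true
          · rw [if_pos hm, PySem.Dict.get?_insert_self, orElse_some_eq, orElse_none_eq]
            show some t = if (kws.any fun kw => PySem.Str.isIn kw (PySem.Str.strip (PySem.Str.lower x))) = true then some t else none
            rw [if_pos hm]
          · rw [if_neg hm, hv]
        · have hc : a.contains x = true := by
            rw [PySem.Dict.contains_eq_isSome_get?, hv]; rfl
          rw [if_pos hc, hv]
      · have hne : h ≠ x := fun e => hxh e.symm
        split_ifs <;> simp [PySem.Dict.get?_insert_of_ne _ _ hne]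
    · have hxh : x = h := by
        cases hmem with
        | head => rfl
        | tail _ hmem => exact absurd hmem hx
      subst hxh
      simp only [List.foldl_cons]
      rcases hv : a.get? x with _ | v
      · have hc : a.contains x = false := by
          rw [PySem.Dict.contains_eq_isSome_get?, hv]; rfl
        simp only [hc, Bool.false_eq_true, if_false]
        by_cases hm : (kws.any fun kw => PySem.Str.isIn kw (PySem.Str.strip (PySem.Str.lower x))) = true
        · rw [if_pos hm, fb_inner_get?_skip x t kws rest _ hx, PySem.Dict.get?_insert_self,
              orElse_none_eq]
          show some t = if (kws.any fun kw => PySem.Str.isIn kw (PySem.Str.strip (PySem.Str.lower x))) = true then some t else none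
          rw [if_pos hm]
        · rw [if_neg hm, fb_inner_get?_skip x t kws rest _ hx, hv, orElse_none_eq]
          show (none : Option String) = if (kws.any fun kw => PySem.Str.isIn kw (PySem.Str.strip (PySem.Str.lower x))) = true then some t else none
          rw [if_neg hm]
      · have hc : a.contains x = true := by
          rw [PySem.Dict.contains_eq_isSome_get?, hv]; rfl
        rw [if_pos hc, fb_inner_get?_skip x t kws rest _ hx, hv, orElse_some_eq]

-- B's outer loop over the pattern list computes fbMatchLoop for every h ∈ headers
theorem fb_outer_get? (h : String) (headers : List String) (hmem : h ∈ headers) :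
    ∀ (P : List (String × List String)) (a : PySem.Dict String String),
      (P.foldl (fun (assigned : PySem.Dict String String) p =>
        headers.foldl (fun (assigned : PySem.Dict String String) header =>
          if assigned.contains header then assigned
          else
            let header_lower := PySem.Str.strip (PySem.Str.lower header)
            if p.2.any (fun kw => PySem.Str.isIn kw header_lower) then
              assigned.insert header p.1
            else assigned) assigned) a).get? h
      = ((a.get? h).orElse (fun _ => fbMatchLoop (PySem.Str.strip (PySem.Str.lower h)) P)) := by
  intro P
  induction P with
  | nil =>
    intro a
    simp only [List.foldl_nil, fbMatchLoop]
    cases a.get? h <;> rfl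
  | cons p rest ih =>
    intro a
    obtain ⟨t, kws⟩ := p
    simp only [List.foldl_cons]
    rw [ih, fb_inner_get? h t kws headers a hmem]
    simp only [fbMatchLoop]
    cases a.get? h with
    | some v => rw [orElse_some_eq, orElse_some_eq, orElse_some_eq]
    | none =>
      rw [orElse_none_eq, orElse_none_eq]
      by_cases hm : (kws.any fun kw => PySem.Str.isIn kw (PySem.Str.strip (PySem.Str.lower h))) = true
      · rw [if_pos hm, orElse_some_eq, if_pos hm]
      · rw [if_neg hm, orElse_none_eq, if_neg hm]

-- ===== VERDICT (by name: the statement is the Claim_ definition above) =====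
set_option maxHeartbeats 1000000 in
theorem fallback_mapping_spec : Claim_equal_fallback_mapping := by
  intro headers _
  show fallback_mapping headers = fallback_mapping_alt headers
  unfold fallback_mapping fallback_mapping_alt
  apply congrArg PySem.Dict.items
  apply PySem.List.foldl_congr_mem
  intro result header hmem
  rw [PySem.Dict.getD_eq_get?_getD, fb_outer_get? header headers hmem fbPatterns PySem.Dict.empty]
  simp only [PySem.Dict.get?_empty, orElse_none_eq]
  cases hm : fbMatchLoop (PySem.Str.strip (PySem.Str.lower header)) fbPatterns <;> rfl
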